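-- pv_equiv track=rewrite | github.com/Team-underdog/underdog | hackathon/backend/app/services/skill_tree_service.py | distribute_skill_xp
-- ===== SOURCE A (Python) =====
-- from typing import Optional, List, Dict, Any
--
-- def distribute_skill_xp(identified_skills: List[str], total_xp: int) -> Dict[str, int]:
--     """스킬별 XP 분배"""
--     if not identified_skills:
--         return {}
--
--     # 균등 분배
--     xp_per_skill = total_xp // len(identified_skills)
--     remainder = total_xp % len(identified_skills)
--
--     distribution = {}
--     for i, skill in enumerate(identified_skills):
--         xp = xp_per_skill + (1 if i < remainder else 0)
--         distribution[skill] = xp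
--
--     return distribution
-- ===== SOURCE B (Python) =====
-- def distribute_skill_xp(identified_skills, total_xp):
--     """스킬별 XP 분배 — greedy: each skill takes the ceiling share of what remains."""
--     distribution = {}
--     remaining = total_xp
--     m = len(identified_skills)
--     for skill in identified_skills:
--         share = -(-remaining // m)  # ceil(remaining / m)
--         distribution[skill] = share
--         remaining -= share
--         m -= 1
--     return distribution
-- ===== Notes on version B (the rewrite author's own statement) =====
-- stated objective: alternative
-- what changed: Replaces A's precomputed quotient/remainder with index test by a greedy single pass that gives each skill the ceiling share -(-remaining // m) of the XP still remaining and decrements the remaining amount and count.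
import Mathlib
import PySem

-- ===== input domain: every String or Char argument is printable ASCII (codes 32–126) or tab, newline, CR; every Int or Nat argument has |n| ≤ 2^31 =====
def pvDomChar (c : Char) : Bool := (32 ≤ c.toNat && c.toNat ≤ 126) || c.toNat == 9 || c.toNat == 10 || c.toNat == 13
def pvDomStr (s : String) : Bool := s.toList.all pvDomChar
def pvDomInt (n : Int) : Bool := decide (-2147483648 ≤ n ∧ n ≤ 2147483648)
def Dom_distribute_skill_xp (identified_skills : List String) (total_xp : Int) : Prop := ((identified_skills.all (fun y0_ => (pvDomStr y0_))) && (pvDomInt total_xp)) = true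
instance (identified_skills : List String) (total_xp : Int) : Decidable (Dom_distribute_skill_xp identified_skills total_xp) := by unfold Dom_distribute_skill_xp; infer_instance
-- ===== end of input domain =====

-- B replaces A's precomputed quotient/remainder with a greedy single pass: each
-- skill takes the ceiling share of the XP still remaining; objective: alternative.

-- ===== PORT A =====
def distribute_skill_xp (identified_skills : List String) (total_xp : Int) : List (String × Int) :=
  if identified_skills = [] then []
  else
    let n : Int := (identified_skills.length : Int)
    let xp_per_skill := PySem.Int.floordiv total_xp n
    let remainder := PySem.Int.mod total_xp n
    ((PySem.List.enumerate identified_skills).foldl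
      (fun (d : PySem.Dict String Int) p =>
        d.insert p.2 (xp_per_skill + (if p.1 < remainder then 1 else 0)))
      PySem.Dict.empty).items

-- ===== PORT B =====
-- state: (distribution, remaining, m); share = -(-remaining // m) is Python's ceil division
def distribute_skill_xp_alt (identified_skills : List String) (total_xp : Int) : List (String × Int) :=
  ((identified_skills.foldl
      (fun (st : PySem.Dict String Int × Int × Int) skill =>
        let share := -(PySem.Int.floordiv (-st.2.1) st.2.2)
        (st.1.insert skill share, st.2.1 - share, st.2.2 - 1))
      (PySem.Dict.empty, total_xp, (identified_skills.length : Int))).1).items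

-- ===== PRECONDITION & SPEC =====
def Spec_distribute_skill_xp (identified_skills : List String) (total_xp : Int) (out : List (String × Int)) : Prop := out = distribute_skill_xp_alt identified_skills total_xp
instance (identified_skills : List String) (total_xp : Int) (out : List (String × Int)) : Decidable (Spec_distribute_skill_xp identified_skills total_xp out) := by unfold Spec_distribute_skill_xp; infer_instance

-- ===== CLAIM =====
def Claim_equal_distribute_skill_xp : Prop := ∀ (identified_skills : List String) (total_xp : Int), Dom_distribute_skill_xp identified_skills total_xp → Spec_distribute_skill_xp identified_skills total_xp (distribute_skill_xp identified_skills total_xp)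

-- ===== LEMMAS AND PROOFS =====

-- Invariant: when the remaining XP is q * (length) + max (r - a) 0 with the slack
-- below the length, the greedy fold inserts exactly A's values q + [a < r], q + [a+1 < r], …
theorem greedy_eq (skills : List String) : ∀ (a q r : Int) (d : PySem.Dict String Int),
    (max (r - a) 0 < (skills.length : Int) ∨ skills = []) →
    (skills.foldl
        (fun (st : PySem.Dict String Int × Int × Int) skill =>
          let share := -(PySem.Int.floordiv (-st.2.1) st.2.2)
          (st.1.insert skill share, st.2.1 - share, st.2.2 - 1))
        (d, q * (skills.length : Int) + max (r - a) 0, (skills.length : Int))).1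
      = (PySem.List.enumerate skills a).foldl
          (fun d' p => d'.insert p.2 (q + (if p.1 < r then 1 else 0))) d := by
  induction skills with
  | nil => intro a q r d _; simp [PySem.List.enumerate_nil]
  | cons x rest ih =>
    intro a q r d h
    have hL : max (r - a) 0 < ((rest.length : Int) + 1) := by
      rcases h with h | h
      · push_cast [List.length_cons] at h; omega
      · simp at h
    have hpos : (0 : Int) < (rest.length : Int) + 1 := by positivity
    have hshare :
        -(PySem.Int.floordiv (-(q * (((x :: rest).length : Int)) + max (r - a) 0)) (((x :: rest).length : Int)))
          = q + (if a < r then 1 else 0) := by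
      have hlen : (((x :: rest).length : Int)) = (rest.length : Int) + 1 := by push_cast [List.length_cons]; ring
      rw [hlen, PySem.Int.neg_floordiv_neg_eq_iff_of_pos hpos]
      by_cases hr : a < r
      · have hM : max (r - a) 0 = r - a := by omega
        simp only [if_pos hr, hM]
        constructor <;> nlinarith [hL, hM]
      · have hM : max (r - a) 0 = 0 := by omega
        simp only [if_neg hr, hM]
        constructor <;> nlinarith
    simp only [List.foldl_cons, PySem.List.enumerate_cons]
    rw [hshare]
    have hrem :
        q * (((x :: rest).length : Int)) + max (r - a) 0 - (q + (if a < r then 1 else 0))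
          = q * (rest.length : Int) + max (r - (a + 1)) 0 := by
      have hlen : (((x :: rest).length : Int)) = (rest.length : Int) + 1 := by push_cast [List.length_cons]; ring
      rw [hlen]
      by_cases hr : a < r
      · have h1 : max (r - a) 0 = r - a := by omega
        have h2 : max (r - (a + 1)) 0 = max (r - a - 1) 0 := by omega
        rw [h1, h2]
        by_cases hr1 : a + 1 < r <;> simp [if_pos hr] <;> ring_nf <;> omega
      · have h1 : max (r - a) 0 = 0 := by omega
        have h2 : max (r - (a + 1)) 0 = 0 := by omega
        rw [h1, h2, if_neg hr]; ring
    have hm : (((x :: rest).length : Int)) - 1 = (rest.length : Int) := by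
      push_cast [List.length_cons]; ring
    rw [hrem, hm]
    exact ih (a + 1) q r (d.insert x (q + (if a < r then 1 else 0)))
      (by rcases Decidable.em (rest = []) with h0 | h0
          · exact Or.inr h0
          · left
            have : (0 : Int) < (rest.length : Int) := by
              have := List.length_pos_iff.mpr h0; exact_mod_cast this
            omega)

-- ===== VERDICT =====
theorem distribute_skill_xp_spec : Claim_equal_distribute_skill_xp := by
  intro skills xp _
  show distribute_skill_xp skills xp = distribute_skill_xp_alt skills xp
  unfold distribute_skill_xp distribute_skill_xp_alt
  by_cases h : skills = []
  · simp [h, PySem.Dict.empty]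
  · simp only [h]
    have hpos : (0 : Int) < (skills.length : Int) := by
      exact_mod_cast List.length_pos_iff.mpr h
    set q := PySem.Int.floordiv xp (skills.length : Int) with hq
    set r := PySem.Int.mod xp (skills.length : Int) with hr
    have hsum : q * (skills.length : Int) + r = xp := PySem.Int.floordiv_mul_add_mod _ _
    have hrnn : 0 ≤ r := PySem.Int.mod_nonneg _ hpos
    have hrlt : r < (skills.length : Int) := PySem.Int.mod_lt _ hpos
    have hmax : max (r - 0) 0 = r := by omega
    have := greedy_eq skills 0 q r PySem.Dict.empty (by left; omega)
    rw [hmax, hsum] at this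
    rw [this]
    simp
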